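-- pv_equiv track=rewrite | github.com/Beb77/MM-121 | SoccerTournament.py | AverageConceded
-- ===== SOURCE A (Python) =====
-- def AverageConceded(N, W, D, X, scored, conceded, points):
--   games = [N-1] * N
--   results = []
--   concededLoc = []
--   for i in range(0,len(conceded)):
--     concededLoc.append(conceded[i])
--   for i in range(0,N-1):#lower number team
--     for j in range(i+1,N):#higher number team
--       score2 = int(concededLoc[i]/games[i])
--       score1 = int(concededLoc[j]/games[j])
--       concededLoc[i] -= score2
--       concededLoc[j] -= score1
--       games[i] -= 1
--       games[j] -= 1
--       results.append(str(score1)+" "+str(score2))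
--   return results
-- ===== SOURCE B (Python) =====
-- def AverageConceded(N, W, D, X, scored, conceded, points):
--   if N < 2:
--     return []
--   # per-team score table: scores[t] = the N-1 values team t emits, in touch order
--   scores = []
--   for t in range(N):
--     c = conceded[t]
--     g = N - 1
--     row = []
--     for _ in range(N - 1):
--       s = int(c / g)
--       row.append(s)
--       c -= s
--       g -= 1
--     scores.append(row)
--   results = []
--   for i in range(N - 1):
--     for j in range(i + 1, N):
--       results.append(str(scores[j][i]) + " " + str(scores[i][j - 1]))
--   return results
-- ===== Notes on version B (the rewrite author's own statement) =====
-- stated objective: alternative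
-- what changed: Replaces A's interleaved stateful single pass (mutating per-team games/conceded arrays while emitting pair results) with a two-phase structure: first precompute each team's emission sequence independently, then assemble the pair results by pure table lookup scores[j][i] / scores[i][j-1].
import Mathlib
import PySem

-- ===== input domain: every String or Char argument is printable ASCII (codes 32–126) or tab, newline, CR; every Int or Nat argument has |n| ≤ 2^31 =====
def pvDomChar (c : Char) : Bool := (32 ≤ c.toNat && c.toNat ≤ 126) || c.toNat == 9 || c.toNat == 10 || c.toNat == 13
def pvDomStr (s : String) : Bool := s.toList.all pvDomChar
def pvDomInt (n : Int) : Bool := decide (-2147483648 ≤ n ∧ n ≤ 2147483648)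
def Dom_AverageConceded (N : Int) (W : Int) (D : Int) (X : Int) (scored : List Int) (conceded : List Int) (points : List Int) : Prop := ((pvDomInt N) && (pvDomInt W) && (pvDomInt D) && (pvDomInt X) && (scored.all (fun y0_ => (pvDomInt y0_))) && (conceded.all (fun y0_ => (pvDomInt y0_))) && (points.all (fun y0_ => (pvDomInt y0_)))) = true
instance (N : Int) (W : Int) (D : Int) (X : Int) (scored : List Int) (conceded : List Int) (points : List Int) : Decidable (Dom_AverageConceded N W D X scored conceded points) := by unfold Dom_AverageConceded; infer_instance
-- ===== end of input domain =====

-- B replaces A's interleaved stateful single pass with a precompute-per-team-table then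
-- assemble-pairs structure (alternative decomposition, same asymptotic cost).

-- ===== PORT A =====
-- Literal port of A.  Python's `int(c/g)` (true division, then truncation toward zero) equals
-- Int.tdiv on the Dom_ domain: every value involved stays ≤ 2^31 in magnitude, far below 2^53,
-- so the float quotient truncates exactly.  Indexing is via pyGetD/pySetD with a default that
-- is never reached under Pre_ (all indices are in range there).
-- body of A's inner loop `for j in range(i+1, N)` over the state (games, concededLoc, results)
def stepA (i : Int) (st : List Int × List Int × List String) (j : Int) :
    List Int × List Int × List String :=
  let score2 := Int.tdiv (PySem.List.pyGetD st.2.1 i 0) (PySem.List.pyGetD st.1 i 0)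
  let score1 := Int.tdiv (PySem.List.pyGetD st.2.1 j 0) (PySem.List.pyGetD st.1 j 0)
  let loc1 := PySem.List.pySetD st.2.1 i (PySem.List.pyGetD st.2.1 i 0 - score2)
  let loc2 := PySem.List.pySetD loc1 j (PySem.List.pyGetD loc1 j 0 - score1)
  let g1 := PySem.List.pySetD st.1 i (PySem.List.pyGetD st.1 i 0 - 1)
  let g2 := PySem.List.pySetD g1 j (PySem.List.pyGetD g1 j 0 - 1)
  (g2, loc2, st.2.2 ++ [PySem.Int.toStr score1 ++ " " ++ PySem.Int.toStr score2])

def AverageConceded (N : Int) (W : Int) (D : Int) (X : Int) (scored : List Int) (conceded : List Int) (points : List Int) : List String :=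
  let games : List Int := List.replicate N.toNat (N - 1)
  let results : List String := []
  let concededLoc : List Int :=
    (PySem.List.pyRange 0 (conceded.length : Int) 1).foldl
      (fun acc i => acc ++ [PySem.List.pyGetD conceded i 0]) []
  let st :=
    (PySem.List.pyRange 0 (N - 1) 1).foldl
      (fun st i => (PySem.List.pyRange (i + 1) N 1).foldl (stepA i) st)
      (games, concededLoc, results)
  st.2.2

-- ===== PORT B =====
-- Source B's inner `for _ in range(k)` loop building one team's row, as structural recursion on k
def altRow (c g : Int) (k : Nat) : List Int :=
  match k with
  | 0 => []
  | k + 1 =>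
    let s := Int.tdiv c g
    s :: altRow (c - s) (g - 1) k

-- the string Source B appends for the pair (i, j)
def outB (scores : List (List Int)) (i j : Int) : String :=
  PySem.Int.toStr (PySem.List.pyGetD (PySem.List.pyGetD scores j []) i 0) ++ " " ++
  PySem.Int.toStr (PySem.List.pyGetD (PySem.List.pyGetD scores i []) (j - 1) 0)

-- body of Source B's inner loop `for j in range(i+1, N)`
def stepB (scores : List (List Int)) (i : Int) (res : List String) (j : Int) : List String :=
  res ++ [outB scores i j]

def AverageConceded_alt (N : Int) (W : Int) (D : Int) (X : Int) (scored : List Int) (conceded : List Int) (points : List Int) : List String :=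
  if N < 2 then []
  else
    let scores : List (List Int) :=
      (PySem.List.pyRange 0 N 1).map
        (fun t => altRow (PySem.List.pyGetD conceded t 0) (N - 1) (N - 1).toNat)
    (PySem.List.pyRange 0 (N - 1) 1).foldl
      (fun res i => (PySem.List.pyRange (i + 1) N 1).foldl (stepB scores i) res) []

-- ===== PRECONDITION & SPEC =====
-- A raises IndexError when N ≥ 2 but conceded has fewer than N entries (it reads conceded[N-1]);
-- for N < 2 the loops never run and A returns [].
def Pre_AverageConceded (N : Int) (W : Int) (D : Int) (X : Int) (scored : List Int) (conceded : List Int) (points : List Int) : Prop :=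
  2 ≤ N → N ≤ (conceded.length : Int)
instance (N : Int) (W : Int) (D : Int) (X : Int) (scored : List Int) (conceded : List Int) (points : List Int) : Decidable (Pre_AverageConceded N W D X scored conceded points) := by unfold Pre_AverageConceded; infer_instance

def pvWitness_AverageConceded : Int × Int × Int × Int × List Int × List Int × List Int := (3, 0, 0, 0, [], [5, 7, 9], [])

def Spec_AverageConceded (N : Int) (W : Int) (D : Int) (X : Int) (scored : List Int) (conceded : List Int) (points : List Int) (out : List String) : Prop := out = AverageConceded_alt N W D X scored conceded points
instance (N : Int) (W : Int) (D : Int) (X : Int) (scored : List Int) (conceded : List Int) (points : List Int) (out : List String) : Decidable (Spec_AverageConceded N W D X scored conceded points out) := by unfold Spec_AverageConceded; infer_instance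

-- ===== CLAIM (what is proved, stated in full; the proofs are below) =====
def Claim_equal_AverageConceded : Prop := ∀ (N : Int) (W : Int) (D : Int) (X : Int) (scored : List Int) (conceded : List Int) (points : List Int), Dom_AverageConceded N W D X scored conceded points → Pre_AverageConceded N W D X scored conceded points → Spec_AverageConceded N W D X scored conceded points (AverageConceded N W D X scored conceded points)

-- ===== LEMMAS AND PROOFS =====

-- residual conceded value of a team after k touches, starting from c with g games left
def pvRes (c g : Int) : Nat → Int
  | 0 => c
  | k + 1 => pvRes (c - Int.tdiv c g) (g - 1) k

-- the value a team emits at its k-th touch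
def pvVal (c g : Int) (k : Nat) : Int := Int.tdiv (pvRes c g k) (g - (k : Int))

-- touch count of team t when A's loops are about to process pair (i, j)
def pvTc (N i j t : Int) : Int :=
  if t < i then N - 1 else if t = i then j - 1 else if t < j then i + 1 else i

-- a list whose first N entries are f 0, …, f (N-1) followed by a fixed tail
def pvML {α : Type} (f : Int → α) (N : Int) (tail : List α) : List α :=
  (List.range N.toNat).map (fun (k : Nat) => f (k : Int)) ++ tail

-- A's games list at pair (i, j)
def pvG (N i j : Int) : List Int := pvML (fun t => N - 1 - pvTc N i j t) N []
-- A's concededLoc list at pair (i, j)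
def pvL (conceded : List Int) (N i j : Int) : List Int :=
  pvML (fun t => pvRes (PySem.List.pyGetD conceded t 0) (N - 1) (pvTc N i j t).toNat) N
    (conceded.drop N.toNat)
-- the string emitted for pair (i, j)
def pvOut (conceded : List Int) (N i j : Int) : String :=
  PySem.Int.toStr (pvVal (PySem.List.pyGetD conceded j 0) (N - 1) i.toNat) ++ " " ++
  PySem.Int.toStr (pvVal (PySem.List.pyGetD conceded i 0) (N - 1) (j - 1).toNat)

theorem pvRes_succ_right (c g : Int) (k : Nat) :
    pvRes c g (k + 1) = pvRes c g k - pvVal c g k := by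
  induction k generalizing c g with
  | zero => simp [pvRes, pvVal]
  | succ k ih =>
    have e1 : pvRes c g (k + 1 + 1) = pvRes (c - Int.tdiv c g) (g - 1) (k + 1) := rfl
    have e2 : pvRes c g (k + 1) = pvRes (c - Int.tdiv c g) (g - 1) k := rfl
    rw [e1, e2, ih]
    have e3 : pvVal (c - Int.tdiv c g) (g - 1) k = pvVal c g (k + 1) := by
      simp only [pvVal, e2]
      congr 1
      push_cast
      ring
    rw [e3]

theorem altRow_getD (c g : Int) (n k : Nat) (hk : k < n) :
    (altRow c g n).getD k 0 = pvVal c g k := by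
  induction n generalizing c g k with
  | zero => omega
  | succ n ih =>
    cases k with
    | zero => simp [altRow, pvVal, pvRes]
    | succ k =>
      have e : (altRow c g (n + 1)).getD (k + 1) 0
          = (altRow (c - Int.tdiv c g) (g - 1) n).getD k 0 := rfl
      rw [e, ih _ _ _ (by omega)]
      have e2 : pvRes c g (k + 1) = pvRes (c - Int.tdiv c g) (g - 1) k := rfl
      simp only [pvVal, e2]
      congr 1
      push_cast
      ring

theorem pvML_get {α : Type} (f : Int → α) (N t : Int) (d : α) (tail : List α)
    (ht : 0 ≤ t) (htN : t < N) :
    PySem.List.pyGetD (pvML f N tail) t d = f t := by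
  simp only [pvML]
  rw [PySem.List.pyGetD_eq_getElem _ d ht (by simp; omega)]
  rw [List.getElem_append_left (by simp; omega)]
  rw [List.getElem_map, List.getElem_range]
  congr 1
  omega

theorem pvML_set {α : Type} (f : Int → α) (N t : Int) (v : α) (tail : List α)
    (ht : 0 ≤ t) (htN : t < N) :
    PySem.List.pySetD (pvML f N tail) t v = pvML (fun x => if x = t then v else f x) N tail := by
  simp only [pvML]
  rw [PySem.List.pySetD_of_nonneg _ _ ht]
  apply List.ext_getElem (by simp)
  intro k hk1 hk2
  simp only [List.getElem_set, List.getElem_append, List.length_map, List.length_range,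
             List.getElem_map, List.getElem_range]
  split_ifs <;> first | rfl | omega | (exfalso; omega) | simp

theorem pvML_congr {α : Type} (f g : Int → α) (N : Int) (tail : List α)
    (h : ∀ x : Int, 0 ≤ x → x < N → f x = g x) : pvML f N tail = pvML g N tail := by
  simp only [pvML]
  congr 1
  apply List.map_congr_left
  intro k hk
  have hk' := List.mem_range.mp hk
  exact h (k : Int) (by omega) (by omega)

theorem stepA_eq (conceded : List Int) (N i j : Int) (res0 : List String)
    (hi : 0 ≤ i) (hij : i < j) (hjN : j < N) :
    stepA i (pvG N i j, pvL conceded N i j, res0) j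
      = (pvG N i (j + 1), pvL conceded N i (j + 1), res0 ++ [pvOut conceded N i j]) := by
  have hne : ¬ (j = i) := by omega
  have hii : ((i.toNat : Nat) : Int) = i := Int.toNat_of_nonneg hi
  have hjj : (((j - 1).toNat : Nat) : Int) = j - 1 := by omega
  have hti : pvTc N i j i = j - 1 := by simp only [pvTc]; split_ifs <;> omega
  have htj : pvTc N i j j = i := by simp only [pvTc]; split_ifs <;> omega
  simp only [stepA, pvG, pvL]
  rw [pvML_get _ N i 0 _ hi (by omega)]
  rw [pvML_get _ N i 0 _ hi (by omega)]
  rw [pvML_get _ N j 0 _ (by omega) hjN]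
  rw [pvML_get _ N j 0 _ (by omega) hjN]
  rw [pvML_set _ N i _ _ hi (by omega)]
  rw [pvML_set _ N i _ _ hi (by omega)]
  rw [pvML_get _ N j 0 _ (by omega) hjN]
  rw [pvML_get _ N j 0 _ (by omega) hjN]
  simp only [if_neg hne]
  rw [pvML_set _ N j _ _ (by omega) hjN]
  rw [pvML_set _ N j _ _ (by omega) hjN]
  simp only [hti, htj, Prod.mk.injEq]
  refine ⟨?_, ?_, ?_⟩
  · -- games
    apply pvML_congr
    intro x hx0 hxN
    simp only [pvTc]
    split_ifs <;> omega
  · -- concededLoc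
    apply pvML_congr
    intro x hx0 hxN
    by_cases hxj : x = j
    · subst hxj
      rw [if_pos rfl]
      have h1 : pvTc N i (x + 1) x = i + 1 := by simp only [pvTc]; split_ifs <;> omega
      rw [h1]
      have h2 : (i + 1).toNat = i.toNat + 1 := by omega
      rw [h2, pvRes_succ_right]
      simp only [pvVal, hii]
    · rw [if_neg hxj]
      by_cases hxi : x = i
      · subst hxi
        rw [if_pos rfl]
        have h1 : pvTc N x (j + 1) x = j := by simp only [pvTc]; split_ifs <;> omega
        rw [h1]
        have h2 : j.toNat = (j - 1).toNat + 1 := by omega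
        rw [h2, pvRes_succ_right]
        simp only [pvVal, hjj]
      · rw [if_neg hxi]
        have h1 : pvTc N i (j + 1) x = pvTc N i j x := by simp only [pvTc]; split_ifs <;> omega
        rw [h1]
  · -- results
    simp only [pvOut, pvVal, hii, hjj]

theorem innerA_fold (conceded : List Int) (N i : Int) (hi : 0 ≤ i) (hiN : i < N - 1) :
    ∀ (k : Nat) (j : Int), (N - j).toNat ≤ k → i < j → j ≤ N → ∀ (res0 : List String),
    (PySem.List.pyRange j N 1).foldl (stepA i) (pvG N i j, pvL conceded N i j, res0)
      = (pvG N i N, pvL conceded N i N,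
         res0 ++ (PySem.List.pyRange j N 1).map (pvOut conceded N i)) := by
  intro k
  induction k with
  | zero =>
    intro j hk hij hjN res0
    have hj : j = N := by omega
    subst hj
    rw [PySem.List.pyRange_one_eq_nil le_rfl]
    simp
  | succ k ih =>
    intro j hk hij hjN res0
    by_cases hjN' : j < N
    · rw [PySem.List.pyRange_one_cons hjN']
      simp only [List.foldl_cons, List.map_cons]
      rw [stepA_eq conceded N i j res0 hi hij hjN']
      rw [ih (j + 1) (by omega) (by omega) (by omega)]
      simp [List.append_assoc]
    · have hj : j = N := by omega
      subst hj
      rw [PySem.List.pyRange_one_eq_nil le_rfl]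
      simp

theorem pvG_shift (N i : Int) (hi : 0 ≤ i) (hiN : i < N - 1) :
    pvG N i N = pvG N (i + 1) (i + 1 + 1) := by
  simp only [pvG]
  apply pvML_congr
  intro x hx0 hxN
  simp only [pvTc]
  split_ifs <;> omega

theorem pvL_shift (conceded : List Int) (N i : Int) (hi : 0 ≤ i) (hiN : i < N - 1) :
    pvL conceded N i N = pvL conceded N (i + 1) (i + 1 + 1) := by
  simp only [pvL]
  apply pvML_congr
  intro x hx0 hxN
  have h1 : pvTc N i N x = pvTc N (i + 1) (i + 1 + 1) x := by
    simp only [pvTc]; split_ifs <;> omega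
  rw [h1]

theorem outerA_fold (conceded : List Int) (N : Int) :
    ∀ (k : Nat) (i : Int), (N - 1 - i).toNat ≤ k → 0 ≤ i → i ≤ N - 1 → ∀ (res0 : List String),
    (PySem.List.pyRange i (N - 1) 1).foldl
        (fun st i' => (PySem.List.pyRange (i' + 1) N 1).foldl (stepA i') st)
        (pvG N i (i + 1), pvL conceded N i (i + 1), res0)
      = (pvG N (N - 1) N, pvL conceded N (N - 1) N,
         res0 ++ (PySem.List.pyRange i (N - 1) 1).flatMap
           (fun i' => (PySem.List.pyRange (i' + 1) N 1).map (pvOut conceded N i'))) := by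
  intro k
  induction k with
  | zero =>
    intro i hk h0 h1 res0
    have hi : i = N - 1 := by omega
    subst hi
    rw [PySem.List.pyRange_one_eq_nil le_rfl]
    have e : N - 1 + 1 = N := by ring
    rw [e]
    simp
  | succ k ih =>
    intro i hk h0 h1 res0
    by_cases hlt : i < N - 1
    · rw [PySem.List.pyRange_one_cons hlt]
      simp only [List.foldl_cons]
      rw [innerA_fold conceded N i h0 hlt (N - (i + 1)).toNat (i + 1) le_rfl (by omega) (by omega)]
      rw [pvG_shift N i h0 hlt, pvL_shift conceded N i h0 hlt]
      rw [ih (i + 1) (by omega) (by omega) (by omega)]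
      simp [List.flatMap_cons, List.append_assoc]
    · have hi : i = N - 1 := by omega
      subst hi
      rw [PySem.List.pyRange_one_eq_nil le_rfl]
      have e : N - 1 + 1 = N := by ring
      rw [e]
      simp

theorem pvG_init (N : Int) (hN : 2 ≤ N) : pvG N 0 1 = List.replicate N.toNat (N - 1) := by
  have h : pvG N 0 1 = pvML (fun _ => N - 1) N [] := by
    simp only [pvG]
    apply pvML_congr
    intro x hx0 hxN
    have h1 : pvTc N 0 1 x = 0 := by simp only [pvTc]; split_ifs <;> omega
    rw [h1]
    ring
  rw [h]
  simp [pvML, List.map_const']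

theorem pvL_init (conceded : List Int) (N : Int) (hlen : N ≤ (conceded.length : Int)) :
    pvL conceded N 0 1 = conceded := by
  have h1 : pvL conceded N 0 1 = pvML (fun t => PySem.List.pyGetD conceded t 0) N (conceded.drop N.toNat) := by
    simp only [pvL]
    apply pvML_congr
    intro x hx0 hxN
    have h2 : pvTc N 0 1 x = 0 := by simp only [pvTc]; split_ifs <;> omega
    rw [h2]
    rfl
  rw [h1]
  simp only [pvML]
  have h3 : (List.range N.toNat).map (fun (k : Nat) => PySem.List.pyGetD conceded (k : Int) 0)
      = conceded.take N.toNat := by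
    apply List.ext_getElem (by simp; omega)
    intro k hk1 hk2
    simp only [List.getElem_map, List.getElem_range, List.getElem_take]
    rw [PySem.List.pyGetD_natCast]
    have hk3 : k < conceded.length := by simp at hk1; omega
    simp [List.getD_eq_getElem?_getD, List.getElem?_eq_getElem hk3]
  rw [h3, List.take_append_drop]

-- a pyGetD at a nonnegative Int index is a getD at its toNat
theorem pyGetD_int_nonneg {α : Type} (xs : List α) (i : Int) (d : α) (h : 0 ≤ i) :
    PySem.List.pyGetD xs i d = xs.getD i.toNat d := by
  rw [show i = ((i.toNat : Nat) : Int) from (Int.toNat_of_nonneg h).symm]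
  rw [PySem.List.pyGetD_natCast, Int.toNat_natCast]

theorem foldl_stepB (scores : List (List Int)) (i : Int) (l : List Int) :
    ∀ (res : List String), l.foldl (stepB scores i) res = res ++ l.map (outB scores i) := by
  induction l with
  | nil => intro res; simp
  | cons x xs ih =>
    intro res
    simp only [List.foldl_cons, stepB, List.map_cons]
    rw [ih]
    simp

theorem outerB_fold (scores : List (List Int)) (N : Int) (l : List Int) :
    ∀ (res : List String),
    l.foldl (fun res i => (PySem.List.pyRange (i + 1) N 1).foldl (stepB scores i) res) res
      = res ++ l.flatMap (fun i => (PySem.List.pyRange (i + 1) N 1).map (outB scores i)) := by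
  induction l with
  | nil => intro res; simp
  | cons x xs ih =>
    intro res
    simp only [List.foldl_cons]
    rw [foldl_stepB, ih]
    simp

theorem flatMap_congr_mem {α β : Type} (l : List α) (f g : α → List β)
    (h : ∀ x ∈ l, f x = g x) : l.flatMap f = l.flatMap g := by
  induction l with
  | nil => rfl
  | cons x xs ih =>
    simp only [List.flatMap_cons]
    rw [h x (by simp), ih (fun y hy => h y (by simp [hy]))]

theorem outB_eq_pvOut (conceded : List Int) (N i j : Int)
    (hi0 : 0 ≤ i) (hiN : i < N - 1) (hij : i < j) (hjN : j < N) :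
    outB ((PySem.List.pyRange 0 N 1).map
        (fun t => altRow (PySem.List.pyGetD conceded t 0) (N - 1) (N - 1).toNat)) i j
      = pvOut conceded N i j := by
  simp only [outB, pvOut]
  rw [PySem.List.pyGetD_map_pyRange_of_nonneg _ N j ([] : List Int) (by omega) hjN]
  rw [PySem.List.pyGetD_map_pyRange_of_nonneg _ N i ([] : List Int) hi0 (by omega)]
  have gi := fun (xs : List Int) => pyGetD_int_nonneg xs i (0 : Int) hi0
  have gj1 := fun (xs : List Int) => pyGetD_int_nonneg xs (j - 1) (0 : Int) (by omega)
  simp only [gi, gj1]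
  have ri : ∀ c g : Int, (altRow c g (N - 1).toNat).getD i.toNat 0 = pvVal c g i.toNat :=
    fun c g => altRow_getD c g _ _ (by omega)
  have rj : ∀ c g : Int, (altRow c g (N - 1).toNat).getD (j - 1).toNat 0 = pvVal c g (j - 1).toNat :=
    fun c g => altRow_getD c g _ _ (by omega)
  simp only [ri, rj]

-- ===== VERDICT (by name: the statement is the Claim_ definition above) =====
theorem AverageConceded_spec : Claim_equal_AverageConceded := by
  unfold Claim_equal_AverageConceded
  intro N W D X scored conceded points _hDom hPre
  unfold Spec_AverageConceded
  by_cases hN : N < 2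
  · have h1 : PySem.List.pyRange 0 (N - 1) 1 = [] := PySem.List.pyRange_one_eq_nil (by omega)
    simp [AverageConceded, AverageConceded_alt, h1, hN]
  · have hN2 : 2 ≤ N := by omega
    have hlen : N ≤ (conceded.length : Int) := hPre hN2
    have hcopy : (PySem.List.pyRange 0 (conceded.length : Int) 1).foldl
        (fun acc i => acc ++ [PySem.List.pyGetD conceded i 0]) [] = conceded := by
      rw [PySem.List.foldl_append_singleton_eq_map]
      simpa using PySem.List.map_pyGetD_pyRange_zero' conceded 0
    have e01G : pvG N 0 1 = pvG N 0 (0 + 1) := by norm_num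
    have e01L : pvL conceded N 0 1 = pvL conceded N 0 (0 + 1) := by norm_num
    have hA : AverageConceded N W D X scored conceded points
        = (PySem.List.pyRange 0 (N - 1) 1).flatMap
            (fun i => (PySem.List.pyRange (i + 1) N 1).map (pvOut conceded N i)) := by
      conv_lhs =>
        simp only [AverageConceded]
        rw [hcopy, ← pvG_init N hN2, ← pvL_init conceded N hlen, e01G, e01L]
      rw [outerA_fold conceded N (N - 1).toNat 0 (by omega) le_rfl (by omega) []]
      simp
    have hB : AverageConceded_alt N W D X scored conceded points
        = (PySem.List.pyRange 0 (N - 1) 1).flatMap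
            (fun i => (PySem.List.pyRange (i + 1) N 1).map (pvOut conceded N i)) := by
      simp only [AverageConceded_alt, if_neg hN]
      rw [outerB_fold]
      simp only [List.nil_append]
      apply flatMap_congr_mem
      intro i hi
      rw [PySem.List.mem_pyRange_one] at hi
      apply List.map_congr_left
      intro j hj
      rw [PySem.List.mem_pyRange_one] at hj
      exact outB_eq_pvOut conceded N i j (by omega) (by omega) (by omega) (by omega)
    rw [hA, hB]
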